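-- pv_equiv track=rewrite | github.com/ziko-ahmed/Codes | CodeForces/Edu. CF Round 180 (Div. 2) | 23 June 2025/C.py | count_winning_triples
-- ===== SOURCE A (Python) =====
-- def count_winning_triples(a):
--     n = len(a)
--     a.sort()
--     M = a[-1]
--     ans = 0
--     for k in range(2, n):
--         T = max(M - a[k], a[k])
--         total_pairs = k * (k - 1) // 2
--
--         cnt_le = 0
--         i, j = 0, k - 1
--         while i < j:
--             if a[i] + a[j] <= T:
--                 cnt_le += (j - i)
--                 i += 1
--             else:
--                 j -= 1
--
--         ans += (total_pairs - cnt_le)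
--
--     return ans
-- ===== SOURCE B (Python) =====
-- def count_winning_triples(a):
--     a.sort()
--     n = len(a)
--     M = a[-1]
--     ans = 0
--     for k in range(2, n):
--         T = max(M - a[k], a[k])
--         for j in range(1, k):
--             for i in range(j):
--                 if a[i] + a[j] > T:
--                     ans += 1
--     return ans
-- ===== Notes on version B (the rewrite author's own statement) =====
-- stated objective: alternative
-- what changed: Replaces the per-k two-pointer sweep computing total_pairs - cnt_le with a direct brute-force count of pairs (i,j) with a[i]+a[j] > T, dropping the total_pairs/complement bookkeeping.
import Mathlib
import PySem

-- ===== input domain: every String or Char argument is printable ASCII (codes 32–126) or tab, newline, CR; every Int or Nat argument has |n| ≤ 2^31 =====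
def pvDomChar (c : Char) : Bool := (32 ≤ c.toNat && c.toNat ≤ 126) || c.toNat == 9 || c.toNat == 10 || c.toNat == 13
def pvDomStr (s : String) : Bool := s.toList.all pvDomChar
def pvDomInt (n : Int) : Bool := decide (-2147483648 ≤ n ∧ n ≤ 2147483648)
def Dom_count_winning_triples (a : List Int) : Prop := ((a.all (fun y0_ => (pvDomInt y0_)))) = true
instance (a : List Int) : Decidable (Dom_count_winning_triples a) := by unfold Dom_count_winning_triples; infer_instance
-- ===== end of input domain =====

-- B replaces A's per-k two-pointer complement count (total_pairs - cnt_le) by a direct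
-- brute-force count of the pairs with a[i]+a[j] > T; equivalence is about the return value
-- (both A and B sort the argument in place).

-- ===== PORT A =====
-- the two-pointer while loop of A
def cwtLoopA (s : List Int) (T : Int) (i j cnt : Int) : Int :=
  if _h : i < j then
    if PySem.List.pyGetD s i 0 + PySem.List.pyGetD s j 0 ≤ T then
      cwtLoopA s T (i + 1) j (cnt + (j - i))
    else
      cwtLoopA s T i (j - 1) cnt
  else cnt
termination_by (j - i).toNat
decreasing_by all_goals omega

def count_winning_triples (a : List Int) : Int :=
  let n : Int := (a.length : Int)
  let s := PySem.List.sorted a (fun x => x) false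
  let M := PySem.List.pyGetD s (-1) 0
  (PySem.List.pyRange 2 n 1).foldl (fun ans k =>
    let T := max (M - PySem.List.pyGetD s k 0) (PySem.List.pyGetD s k 0)
    let totalPairs := PySem.Int.floordiv (k * (k - 1)) 2
    let cntLe := cwtLoopA s T 0 (k - 1) 0
    ans + (totalPairs - cntLe)) 0

-- ===== PORT B =====
def count_winning_triples_alt (a : List Int) : Int :=
  let s := PySem.List.sorted a (fun x => x) false
  let n : Int := (a.length : Int)
  let M := PySem.List.pyGetD s (-1) 0
  (PySem.List.pyRange 2 n 1).foldl (fun ans k =>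
    let T := max (M - PySem.List.pyGetD s k 0) (PySem.List.pyGetD s k 0)
    (PySem.List.pyRange 1 k 1).foldl (fun ans2 j =>
      (PySem.List.pyRange 0 j 1).foldl (fun ans3 i =>
        if PySem.List.pyGetD s i 0 + PySem.List.pyGetD s j 0 > T then ans3 + 1 else ans3) ans2) ans) 0

-- ===== PRECONDITION & SPEC =====
-- Pre_ excludes only the empty list, on which the Python A (and B) raises IndexError at a[-1].
def Pre_count_winning_triples (a : List Int) : Prop := a ≠ []
instance (a : List Int) : Decidable (Pre_count_winning_triples a) := by
  unfold Pre_count_winning_triples; infer_instance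
def pvWitness_count_winning_triples : List Int := [3, 1, 2, 5]
def Spec_count_winning_triples (a : List Int) (out : Int) : Prop := out = count_winning_triples_alt a
instance (a : List Int) (out : Int) : Decidable (Spec_count_winning_triples a out) := by
  unfold Spec_count_winning_triples; infer_instance

-- ===== CLAIM (what is proved, stated in full; the proofs are below) =====
def Claim_equal_count_winning_triples : Prop := ∀ (a : List Int), Dom_count_winning_triples a → Pre_count_winning_triples a → Spec_count_winning_triples a (count_winning_triples a)


-- ===== LEMMAS AND PROOFS =====

-- number of p in [i, q) with s[p] + s[q] ≤ T
def cntLE (s : List Int) (T : Int) (i q : Nat) : Nat :=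
  (List.range' i (q - i)).countP (fun p => decide (s.getD p 0 + s.getD q 0 ≤ T))

-- number of pairs i ≤ p < q ≤ j with s[p] + s[q] ≤ T
def W (s : List Int) (T : Int) (i j : Nat) : Nat :=
  ((List.range' (i + 1) (j - i)).map (fun q => cntLE s T i q)).sum

-- monotone access on a sorted list
theorem getD_mono (s : List Int) (hs : s.Pairwise (· ≤ ·)) {p q : Nat}
    (hpq : p ≤ q) (hq : q < s.length) : s.getD p 0 ≤ s.getD q 0 := by
  rcases Nat.lt_or_ge p q with h | h
  · have hp : p < s.length := lt_trans h hq
    rw [List.getD_eq_getElem s 0 hp, List.getD_eq_getElem s 0 hq]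
    exact List.pairwise_iff_getElem.mp hs p q hp hq h
  · have : p = q := le_antisymm hpq h
    subst this
    exact le_refl _

theorem cntLE_self (s : List Int) (T : Int) (i : Nat) : cntLE s T i i = 0 := by
  simp [cntLE]

theorem cntLE_split (s : List Int) (T : Int) (i q : Nat) (hiq : i < q) :
    cntLE s T i q
      = (if s.getD i 0 + s.getD q 0 ≤ T then 1 else 0) + cntLE s T (i + 1) q := by
  unfold cntLE
  have h1 : q - i = (q - (i + 1)) + 1 := by omega
  rw [h1, List.range'_succ, List.countP_cons]
  simp only [decide_eq_true_eq]
  by_cases h : s.getD i 0 + s.getD q 0 ≤ T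
  · rw [if_pos h]; omega
  · rw [if_neg h]; omega

theorem sum_map_add_length (l : List Nat) (f : Nat → Nat) :
    (l.map (fun q => f q + 1)).sum = (l.map f).sum + l.length := by
  induction l with
  | nil => simp
  | cons x xs ih => simp [ih]; omega

theorem W_of_le (s : List Int) (T : Int) {i j : Nat} (h : j ≤ i) : W s T i j = 0 := by
  simp [W, Nat.sub_eq_zero_of_le h]

theorem W_le_step (s : List Int) (T : Int) (hs : s.Pairwise (· ≤ ·)) {i j : Nat}
    (hij : i < j) (hj : j < s.length) (hle : s.getD i 0 + s.getD j 0 ≤ T) :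
    W s T i j = (j - i) + W s T (i + 1) j := by
  have hcong : ∀ q ∈ List.range' (i + 1) (j - i), cntLE s T i q = cntLE s T (i + 1) q + 1 := by
    intro q hq
    rw [List.mem_range'_1] at hq
    have hql : q ≤ j := by omega
    have hmq : s.getD q 0 ≤ s.getD j 0 := getD_mono s hs hql hj
    have hc : s.getD i 0 + s.getD q 0 ≤ T := by omega
    rw [cntLE_split s T i q (by omega), if_pos hc]
    omega
  unfold W
  rw [List.map_congr_left hcong, sum_map_add_length]
  have h1 : j - i = (j - (i + 1)) + 1 := by omega
  rw [h1, List.range'_succ, List.map_cons, List.sum_cons, cntLE_self]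
  simp only [show (fun q => cntLE s T (i + 1) q) = cntLE s T (i + 1) from rfl,
    List.length_cons, List.length_range']
  omega

theorem W_gt_step (s : List Int) (T : Int) (hs : s.Pairwise (· ≤ ·)) {i j : Nat}
    (hij : i < j) (hj : j < s.length) (hgt : ¬ s.getD i 0 + s.getD j 0 ≤ T) :
    W s T i j = W s T i (j - 1) := by
  have hz : cntLE s T i j = 0 := by
    unfold cntLE
    rw [List.countP_eq_zero]
    intro p hp
    rw [List.mem_range'_1] at hp
    have h3 : s.getD i 0 ≤ s.getD p 0 := getD_mono s hs (by omega) (by omega)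
    simp only [decide_eq_true_eq]
    omega
  unfold W
  have h1 : j - i = (j - 1 - i) + 1 := by omega
  rw [h1, List.range'_concat, List.map_append, List.sum_append]
  have h2 : i + 1 + 1 * (j - 1 - i) = j := by omega
  rw [h2]
  simp [hz]

theorem tp_loop (s : List Int) (T : Int) (hs : s.Pairwise (· ≤ ·)) :
    ∀ (d i j : Nat) (cnt : Int), j - i = d → j < s.length →
      cwtLoopA s T (i : Int) (j : Int) cnt = cnt + (W s T i j : Int) := by
  intro d
  induction d with
  | zero =>
    intro i j cnt hd hj
    rw [cwtLoopA, dif_neg (by omega)]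
    rw [W_of_le s T (by omega)]
    simp
  | succ d ih =>
    intro i j cnt hd hj
    rw [cwtLoopA, dif_pos (by omega)]
    simp only [PySem.List.pyGetD_natCast]
    by_cases hle : s.getD i 0 + s.getD j 0 ≤ T
    · rw [if_pos hle]
      have hcast : ((i : Int) + 1) = ((i + 1 : Nat) : Int) := by push_cast; ring
      rw [hcast, ih (i + 1) j (cnt + ((j : Int) - (i : Int))) (by omega) hj]
      rw [W_le_step s T hs (by omega) hj hle]
      push_cast
      omega
    · rw [if_neg hle]
      have hcast : ((j : Int) - 1) = ((j - 1 : Nat) : Int) := by omega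
      rw [hcast, ih i (j - 1) cnt (by omega) (by omega)]
      rw [W_gt_step s T hs (by omega) hj hle]

theorem gauss : ∀ m : Nat, (((List.range m).map (fun t => 1 + t)).sum) * 2 = m * (m + 1) := by
  intro m
  induction m with
  | zero => simp
  | succ n ih =>
    rw [List.range_succ, List.map_append, List.sum_append]
    simp only [List.map_cons, List.map_nil, List.sum_cons, List.sum_nil]
    nlinarith

theorem sum_map_add_nat (l : List Nat) (f g : Nat → Nat) :
    (l.map (fun x => f x + g x)).sum = (l.map f).sum + (l.map g).sum := by
  induction l with
  | nil => simp
  | cons x xs ih => simp [ih]; omega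

-- complement counting: pairs > T plus pairs ≤ T below q make up all of [0, q)
theorem ngt_nle (s : List Int) (T : Int) (q : Nat) :
    (List.range q).countP (fun p => decide (T < s.getD p 0 + s.getD q 0)) + cntLE s T 0 q
      = q := by
  unfold cntLE
  rw [Nat.sub_zero, ← List.range_eq_range']
  have h1 := List.length_eq_countP_add_countP
    (fun p => decide (T < s.getD p 0 + s.getD q 0)) (l := List.range q)
  rw [List.length_range] at h1
  have h2 : List.countP
      (fun a => decide ¬((fun p => decide (T < s.getD p 0 + s.getD q 0)) a = true))
      (List.range q)
      = List.countP (fun p => decide (s.getD p 0 + s.getD q 0 ≤ T)) (List.range q) := by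
    apply List.countP_congr
    intro a _
    simp [not_lt]
  rw [h2] at h1
  omega

theorem W_zero_left (s : List Int) (T : Int) (m : Nat) :
    W s T 0 m = ((List.range m).map (fun t => cntLE s T 0 (1 + t))).sum := by
  unfold W
  rw [Nat.sub_zero, List.range'_eq_map_range, List.map_map]
  rfl

-- the per-k identity: the brute-force > T count equals total_pairs - cnt_le
theorem perk_core (s : List Int) (T : Int) (kn : Nat) (h2 : 2 ≤ kn) :
    ((List.range (kn - 1)).map (fun t =>
        ((List.range (1 + t)).countP
          (fun p => decide (T < s.getD p 0 + s.getD (1 + t) 0)) : Int))).sum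
      = PySem.Int.floordiv ((kn : Int) * ((kn : Int) - 1)) 2 - (W s T 0 (kn - 1) : Int) := by
  have hW := W_zero_left s T (kn - 1)
  have hpt : ((List.range (kn - 1)).map (fun t =>
      (List.range (1 + t)).countP (fun p => decide (T < s.getD p 0 + s.getD (1 + t) 0))
        + cntLE s T 0 (1 + t))).sum
      = ((List.range (kn - 1)).map (fun t => 1 + t)).sum := by
    apply congrArg List.sum
    apply List.map_congr_left
    intro t _
    exact ngt_nle s T (1 + t)
  rw [sum_map_add_nat] at hpt
  have hg := gauss (kn - 1)
  have hfd : PySem.Int.floordiv ((kn : Int) * ((kn : Int) - 1)) 2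
      = ((((List.range (kn - 1)).map (fun t => 1 + t)).sum : Nat) : Int) := by
    have hc := congrArg (fun m : Nat => (m : Int)) hg
    simp only [Nat.cast_mul, Nat.cast_add, Nat.cast_ofNat, Nat.cast_one] at hc
    rw [Nat.cast_sub (by omega)] at hc
    rw [Nat.cast_one] at hc
    have hx : ((kn : Int) * ((kn : Int) - 1))
        = ((((List.range (kn - 1)).map (fun t => 1 + t)).sum : Nat) : Int) * 2 := by
      linear_combination -hc
    rw [hx, PySem.Int.floordiv_eq_ediv_of_pos (by norm_num)]
    omega
  rw [hfd]
  have hcast : ((List.range (kn - 1)).map (fun t =>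
      ((List.range (1 + t)).countP
        (fun p => decide (T < s.getD p 0 + s.getD (1 + t) 0)) : Int))).sum
      = ((((List.range (kn - 1)).map (fun t =>
        (List.range (1 + t)).countP
          (fun p => decide (T < s.getD p 0 + s.getD (1 + t) 0)))).sum : Nat) : Int) := by
    rw [Nat.cast_list_sum, List.map_map]
    rfl
  rw [hcast]
  omega

-- the two per-k fold bodies agree
theorem perk (s : List Int) (T : Int) (hs : s.Pairwise (· ≤ ·)) (k : Int)
    (h2 : 2 ≤ k) (hk : k < (s.length : Int)) (acc : Int) :
    acc + (PySem.Int.floordiv (k * (k - 1)) 2 - cwtLoopA s T 0 (k - 1) 0)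
      = (PySem.List.pyRange 1 k 1).foldl (fun ans2 j =>
          (PySem.List.pyRange 0 j 1).foldl (fun ans3 i =>
            if PySem.List.pyGetD s i 0 + PySem.List.pyGetD s j 0 > T then ans3 + 1 else ans3)
            ans2) acc := by
  obtain ⟨kn, rfl⟩ : ∃ kn : Nat, k = (kn : Int) := ⟨k.toNat, by omega⟩
  have h2n : 2 ≤ kn := by exact_mod_cast h2
  have hkn : kn < s.length := by exact_mod_cast hk
  have step1 : (PySem.List.pyRange 1 (kn : Int) 1).foldl (fun ans2 j =>
      (PySem.List.pyRange 0 j 1).foldl (fun ans3 i =>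
        if PySem.List.pyGetD s i 0 + PySem.List.pyGetD s j 0 > T then ans3 + 1 else ans3)
        ans2) acc
      = acc + ((PySem.List.pyRange 1 (kn : Int) 1).map (fun j =>
          ((PySem.List.pyRange 0 j 1).countP
            (fun i => decide (PySem.List.pyGetD s i 0 + PySem.List.pyGetD s j 0 > T)) : Int))).sum := by
    rw [PySem.List.foldl_congr_mem _ _ _ _
      (by intro acc2 j _; exact PySem.List.foldl_ite_add_one _ _ _)]
    exact PySem.List.foldl_add _ _ _
  rw [step1]
  have step2 : ((PySem.List.pyRange 1 (kn : Int) 1).map (fun j =>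
      ((PySem.List.pyRange 0 j 1).countP
        (fun i => decide (PySem.List.pyGetD s i 0 + PySem.List.pyGetD s j 0 > T)) : Int))).sum
      = ((List.range (kn - 1)).map (fun t =>
          ((List.range (1 + t)).countP
            (fun p => decide (T < s.getD p 0 + s.getD (1 + t) 0)) : Int))).sum := by
    rw [PySem.List.pyRange_one]
    rw [show ((kn : Int) - 1).toNat = kn - 1 by omega]
    rw [List.map_map]
    apply congrArg List.sum
    apply List.map_congr_left
    intro t _
    simp only [Function.comp]
    congr 1
    have hcast : ((1 : Int) + (t : Int)) = ((1 + t : Nat) : Int) := by push_cast; ring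
    simp only [hcast]
    rw [PySem.List.pyRange_one]
    rw [show (((1 + t : Nat) : Int) - 0).toNat = 1 + t by omega]
    rw [List.countP_map]
    apply List.countP_congr
    intro u _
    simp only [Function.comp, zero_add, PySem.List.pyGetD_natCast, gt_iff_lt]
  rw [step2, perk_core s T kn h2n]
  have hL : cwtLoopA s T 0 ((kn : Int) - 1) 0 = ((W s T 0 (kn - 1) : Nat) : Int) := by
    rw [show ((kn : Int) - 1) = ((kn - 1 : Nat) : Int) by omega]
    have h := tp_loop s T hs (kn - 1) 0 (kn - 1) 0 rfl (by omega)
    rw [Nat.cast_zero, zero_add] at h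
    exact h
  rw [hL]

-- ===== VERDICT (by name: the statement is the Claim_ definition above) =====
theorem count_winning_triples_spec : Claim_equal_count_winning_triples := by
  intro a _ _
  unfold Spec_count_winning_triples
  simp only [count_winning_triples, count_winning_triples_alt]
  have hs : (PySem.List.sorted a (fun x => x) false).Pairwise (· ≤ ·) := by
    simpa using PySem.List.sorted_pairwise a (fun x => x)
  apply PySem.List.foldl_congr_mem
  intro acc k hk
  rw [PySem.List.mem_pyRange_one] at hk
  exact perk _ _ hs k hk.1 (by rw [PySem.List.length_sorted]; exact_mod_cast hk.2) acc
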